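-- pv_equiv track=rewrite | github.com/iggyshu/aoc2024 | day9/solution.py | compress_full_files
-- ===== SOURCE A (Python) =====
-- from typing import List
--
-- def find_spaces(D):
--     def is_empty(index):
--         return D[index] == "."
--
--     spaces = []
--     left = 0
--     while left < len(D):
--         while left < len(D) and not is_empty(left):
--             left += 1
--
--         if left >= len(D):
--             break
--
--         temp = left
--         while temp < len(D) and is_empty(temp):
--             temp += 1
--
--         spaces.append((left, temp))
--
--         left = temp
--
--     return spaces
--
-- def find_files(D):
--     files = []
--     left = 0
--     while left < len(D):
--
--         def is_empty(index):
--             return D[index] == "."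
--
--         while left < len(D) and is_empty(left):
--             left += 1
--
--         temp = left
--         while temp < len(D) and D[temp] == D[left]:
--             temp += 1
--
--         files.append((left, temp))
--
--         left = temp
--
--     return files
--
-- def compress_full_files(blocks: List[str]) -> List[str]:
--     def size(chunk):
--         return chunk[-1] - chunk[0]
--
--     D = list(blocks)
--
--     spaces = find_spaces(D)
--     files_reversed = find_files(D)[::-1]
--
--     for i, file in enumerate(files_reversed):
--         for j, space in enumerate(spaces):
--             if size(file) <= size(space) and file[0] > space[0]:
--                 left = space[0]
--                 right = file[0]
--                 while right < file[1]:
--                     D[left], D[right] = D[right], D[left]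
--                     left += 1
--                     right += 1
--                 if size(file) == size(space):
--                     del spaces[j]
--                 else:
--                     spaces[j] = left, space[1]
--                 break
--
--     return D
-- ===== SOURCE B (Python) =====
-- from typing import List
--
-- def compress_full_files(blocks: List[str]) -> List[str]:
--     n = len(blocks)
--     # single-pass run-length tokenization: maximal runs of equal blocks
--     runs = []
--     i = 0
--     while i < n:
--         j = i + 1
--         while j < n and blocks[j] == blocks[i]:
--             j += 1
--         runs.append((i, j))
--         i = j
--     spaces = [r for r in runs if blocks[r[0]] == "."]
--     files = [r for r in runs if blocks[r[0]] != "."]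
--     # decide each file's final position (right to left); never mutate the disk
--     placed = []
--     for fs, fe in reversed(files):
--         l = fe - fs
--         pos = fs
--         for j, (gs, ge) in enumerate(spaces):
--             if gs >= fs:
--                 break  # gaps are sorted by start: nothing further can be left of the file
--             if ge - gs >= l:
--                 pos = gs
--                 if ge - gs == l:
--                     del spaces[j]
--                 else:
--                     spaces[j] = (gs + l, ge)
--                 break
--         placed.append((blocks[fs], pos, l))
--     # render the final disk from the placements over a dot background
--     def cell(i):
--         for c, p, l in placed:
--             if p <= i < p + l:
--                 return c
--         return "."
--     return [cell(i) for i in range(n)]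
-- ===== Notes on version B (the rewrite author's own statement) =====
-- stated objective: alternative
-- what changed: B replaces A's three index-walking scans and in-place block-swapping with one run-length tokenization pass, a gap scan that exits early once gap starts pass the file (gaps stay sorted), and a final rendering of the disk from the computed placements over a dot background, never mutating the disk.
import Mathlib
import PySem

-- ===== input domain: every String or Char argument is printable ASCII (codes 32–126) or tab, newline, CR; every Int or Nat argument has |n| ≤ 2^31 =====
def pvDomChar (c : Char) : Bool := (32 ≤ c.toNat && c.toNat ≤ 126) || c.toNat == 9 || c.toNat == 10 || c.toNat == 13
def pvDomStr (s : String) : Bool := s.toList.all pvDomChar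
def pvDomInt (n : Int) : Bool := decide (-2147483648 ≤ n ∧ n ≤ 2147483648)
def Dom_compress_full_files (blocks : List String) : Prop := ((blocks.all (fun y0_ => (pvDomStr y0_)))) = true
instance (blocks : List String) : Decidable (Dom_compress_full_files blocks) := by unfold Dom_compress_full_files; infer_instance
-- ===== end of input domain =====

-- B re-implements AoC day9 part-2 defrag without mutating the disk: one run-length tokenization pass,
-- a gap scan with early exit, then the final disk is rendered from the computed placements (objective: alternative).

-- ===== PORT A =====
-- D[i] (indices produced by the loops are always in range in A)
def pvGet (D : List String) (i : Nat) : String := D.getD i ""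

-- inner loop of find_spaces: `while left < len(D) and not is_empty(left): left += 1`
def skipNonDot (D : List String) (left : Nat) : Nat :=
  if left < D.length then
    if pvGet D left == "." then left else skipNonDot D (left + 1)
  else left
termination_by D.length - left

-- `while temp < len(D) and is_empty(temp): temp += 1` (also the dot-skip loop of find_files)
def skipDot (D : List String) (left : Nat) : Nat :=
  if left < D.length then
    if pvGet D left == "." then skipDot D (left + 1) else left
  else left
termination_by D.length - left

-- `while temp < len(D) and D[temp] == D[left]: temp += 1`
def extendEq (D : List String) (c : String) (temp : Nat) : Nat :=
  if temp < D.length then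
    if pvGet D temp == c then extendEq D c (temp + 1) else temp
  else temp
termination_by D.length - temp

theorem le_skipNonDot (D : List String) (l : Nat) : l ≤ skipNonDot D l := by
  unfold skipNonDot
  split
  · split
    · exact Nat.le_refl l
    · exact Nat.le_trans (Nat.le_succ l) (le_skipNonDot D (l + 1))
  · exact Nat.le_refl l
termination_by D.length - l

theorem le_skipDot (D : List String) (l : Nat) : l ≤ skipDot D l := by
  unfold skipDot
  split
  · split
    · exact Nat.le_trans (Nat.le_succ l) (le_skipDot D (l + 1))
    · exact Nat.le_refl l
  · exact Nat.le_refl l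
termination_by D.length - l

theorem le_extendEq (D : List String) (c : String) (t : Nat) : t ≤ extendEq D c t := by
  unfold extendEq
  split
  · split
    · exact Nat.le_trans (Nat.le_succ t) (le_extendEq D c (t + 1))
    · exact Nat.le_refl t
  · exact Nat.le_refl t
termination_by D.length - t

theorem skipNonDot_dot (D : List String) (l : Nat) (h : skipNonDot D l < D.length) :
    pvGet D (skipNonDot D l) == "." := by
  by_cases h1 : l < D.length
  · by_cases h2 : pvGet D l == "."
    · have e : skipNonDot D l = l := by rw [skipNonDot]; simp [h1, h2]
      rw [e]; exact h2
    · have e : skipNonDot D l = skipNonDot D (l + 1) := by rw [skipNonDot]; simp [h1, h2]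
      rw [e] at h ⊢; exact skipNonDot_dot D (l + 1) h
  · exfalso
    have e : skipNonDot D l = l := by rw [skipNonDot]; simp [h1]
    rw [e] at h; exact h1 h
termination_by D.length - l

-- outer loop of find_spaces
def fsAux (D : List String) (left : Nat) : List (Nat × Nat) :=
  if left < D.length then
    let l2 := skipNonDot D left
    if l2 < D.length then
      let temp := skipDot D l2
      (l2, temp) :: fsAux D temp
    else []
  else []
termination_by D.length - left
decreasing_by
  · have h1 : left ≤ skipNonDot D left := le_skipNonDot D left
    have h2 : pvGet D (skipNonDot D left) == "." := skipNonDot_dot D left (by omega)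
    have h4 : skipNonDot D left + 1 ≤ skipDot D (skipNonDot D left) := by
      conv_rhs => rw [skipDot]
      simp only [if_pos ‹skipNonDot D left < D.length›, if_pos h2]
      exact le_skipDot D (skipNonDot D left + 1)
    omega

-- find_files, from index `left` (keeps A's trailing (n, n) chunk when the scan over dots hits the end)
def ffAux (D : List String) (left : Nat) : List (Nat × Nat) :=
  if left < D.length then
    let l2 := skipDot D left
    let temp := extendEq D (pvGet D l2) l2
    (l2, temp) :: ffAux D temp
  else []
termination_by D.length - left
decreasing_by
  · have h1 : left ≤ skipDot D left := le_skipDot D left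
    by_cases h2 : skipDot D left < D.length
    · have h4 : skipDot D left + 1 ≤ extendEq D (pvGet D (skipDot D left)) (skipDot D left) := by
        conv_rhs => rw [extendEq]
        simp only [if_pos h2, if_pos (beq_self_eq_true _)]
        exact le_extendEq D _ _
      omega
    · have e : extendEq D (pvGet D (skipDot D left)) (skipDot D left) = skipDot D left := by
        rw [extendEq]; simp [h2]
      rw [e]; omega

-- the block-swapping while loop: D[left], D[right] = D[right], D[left]; left += 1; right += 1
def swapLoop (D : List String) (left right fe : Nat) : List String :=
  if right < fe then
    swapLoop ((D.set left (pvGet D right)).set right (pvGet D left)) (left + 1) (right + 1) fe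
  else D
termination_by fe - right

-- `for j, space in enumerate(spaces): …` for one file (fs, fe): first fitting gap left of the file
def procA (D : List String) (f : Nat × Nat) : List (Nat × Nat) → List String × List (Nat × Nat)
  | [] => (D, [])
  | (gs, ge) :: rest =>
    if f.2 - f.1 ≤ ge - gs ∧ gs < f.1 then
      let D' := swapLoop D gs f.1 f.2
      if f.2 - f.1 = ge - gs then (D', rest) else (D', (gs + (f.2 - f.1), ge) :: rest)
    else
      let r := procA D f rest
      (r.1, (gs, ge) :: r.2)

-- `for i, file in enumerate(files_reversed): …`
def mainLoopA : List String → List (Nat × Nat) → List (Nat × Nat) → List String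
  | D, _, [] => D
  | D, sp, f :: fsR => mainLoopA (procA D f sp).1 (procA D f sp).2 fsR

def compress_full_files (blocks : List String) : List String :=
  mainLoopA blocks (fsAux blocks 0) ((ffAux blocks 0).reverse)

-- ===== PORT B =====
-- `while j < n and blocks[j] == blocks[i]: j += 1`
def runEnd (blocks : List String) (c : String) (j : Nat) : Nat :=
  if j < blocks.length then
    if pvGet blocks j == c then runEnd blocks c (j + 1) else j
  else j
termination_by blocks.length - j

theorem le_runEnd (blocks : List String) (c : String) (j : Nat) : j ≤ runEnd blocks c j := by
  unfold runEnd
  split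
  · split
    · exact Nat.le_trans (Nat.le_succ j) (le_runEnd blocks c (j + 1))
    · exact Nat.le_refl j
  · exact Nat.le_refl j
termination_by blocks.length - j

-- one-pass run-length tokenization
def rleAux (blocks : List String) (i : Nat) : List (Nat × Nat) :=
  if i < blocks.length then
    let j := runEnd blocks (pvGet blocks i) (i + 1)
    (i, j) :: rleAux blocks j
  else []
termination_by blocks.length - i
decreasing_by
  · have := le_runEnd blocks (pvGet blocks i) (i + 1)
    omega

-- B's gap scan with early exit at `gs >= fs`
def scanB (fs l : Nat) : List (Nat × Nat) → Option Nat × List (Nat × Nat)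
  | [] => (none, [])
  | (gs, ge) :: rest =>
    if fs ≤ gs then (none, (gs, ge) :: rest)
    else if l ≤ ge - gs then
      (some gs, if ge - gs = l then rest else (gs + l, ge) :: rest)
    else
      let r := scanB fs l rest
      (r.1, (gs, ge) :: r.2)

-- `for fs, fe in reversed(files): … placed.append((blocks[fs], pos, l))`
def placeLoop (blocks : List String) :
    List (Nat × Nat) → List (Nat × Nat) → List (String × Nat × Nat) → List (String × Nat × Nat)
  | _, [], acc => acc
  | sp, (fs, fe) :: rest, acc =>
    let r := scanB fs (fe - fs) sp
    placeLoop blocks r.2 rest (acc ++ [(pvGet blocks fs, r.1.getD fs, fe - fs)])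

-- `def cell(i): …` first placement covering i, else "."
def cellB : List (String × Nat × Nat) → Nat → String
  | [], _ => "."
  | (c, p, l) :: rest, i => if p ≤ i ∧ i < p + l then c else cellB rest i

def compress_full_files_alt (blocks : List String) : List String :=
  let runs := rleAux blocks 0
  let spaces := runs.filter (fun r => pvGet blocks r.1 == ".")
  let files := runs.filter (fun r => !(pvGet blocks r.1 == "."))
  let placed := placeLoop blocks spaces files.reverse []
  (List.range blocks.length).map (cellB placed)

-- ===== PRECONDITION & SPEC =====
def Spec_compress_full_files (blocks : List String) (out : List String) : Prop := out = compress_full_files_alt blocks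
instance (blocks : List String) (out : List String) : Decidable (Spec_compress_full_files blocks out) := by unfold Spec_compress_full_files; infer_instance

-- ===== CLAIM (what is proved, stated in full; the proofs are below) =====
def Claim_equal_compress_full_files : Prop := ∀ (blocks : List String), Dom_compress_full_files blocks → Spec_compress_full_files blocks (compress_full_files blocks)

-- ===== LEMMAS AND PROOFS =====


-- ---------- scan characterizations ----------

theorem skipNonDot_congr (D : List String) (a b : Nat) (hab : a ≤ b) (hb : b ≤ D.length)
    (h : ∀ k, a ≤ k → k < b → ¬(pvGet D k == ".")) : skipNonDot D a = skipNonDot D b := by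
  by_cases hab2 : a < b
  · have ha : a < D.length := by omega
    have e : skipNonDot D a = skipNonDot D (a + 1) := by
      rw [skipNonDot]; simp [ha, h a le_rfl hab2]
    rw [e]
    exact skipNonDot_congr D (a + 1) b hab2 hb (fun k hk1 hk2 => h k (by omega) hk2)
  · have : a = b := by omega
    rw [this]
termination_by b - a

theorem skipDot_congr (D : List String) (a b : Nat) (hab : a ≤ b) (hb : b ≤ D.length)
    (h : ∀ k, a ≤ k → k < b → pvGet D k == ".") : skipDot D a = skipDot D b := by
  by_cases hab2 : a < b
  · have ha : a < D.length := by omega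
    have e : skipDot D a = skipDot D (a + 1) := by
      rw [skipDot]; simp [ha, h a le_rfl hab2]
    rw [e]
    exact skipDot_congr D (a + 1) b hab2 hb (fun k hk1 hk2 => h k (by omega) hk2)
  · have : a = b := by omega
    rw [this]
termination_by b - a

theorem skipDot_stops (D : List String) (a b : Nat) (hab : a ≤ b) (hb : b ≤ D.length)
    (h : ∀ k, a ≤ k → k < b → pvGet D k == ".")
    (hexit : b = D.length ∨ ¬(pvGet D b == ".")) : skipDot D a = b := by
  rw [skipDot_congr D a b hab hb h, skipDot]
  rcases hexit with he | he
  · simp [he]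
  · by_cases hbl : b < D.length
    · simp [hbl, he]
    · simp [hbl]

theorem extendEq_stops (D : List String) (c : String) (a b : Nat) (hab : a ≤ b) (hb : b ≤ D.length)
    (h : ∀ k, a ≤ k → k < b → pvGet D k == c)
    (hexit : b = D.length ∨ ¬(pvGet D b == c)) : extendEq D c a = b := by
  by_cases hab2 : a < b
  · have ha : a < D.length := by omega
    have e : extendEq D c a = extendEq D c (a + 1) := by
      rw [extendEq]; simp [ha, h a le_rfl hab2]
    rw [e]
    exact extendEq_stops D c (a + 1) b hab2 hb (fun k hk1 hk2 => h k (by omega) hk2) hexit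
  · have hba : a = b := by omega
    subst hba
    rw [extendEq]
    rcases hexit with he | he
    · simp [he]
    · by_cases hbl : a < D.length
      · simp [hbl, he]
      · simp [hbl]
termination_by b - a

theorem extendEq_le (D : List String) (c : String) (t : Nat) (ht : t ≤ D.length) :
    extendEq D c t ≤ D.length := by
  rw [extendEq]
  by_cases h1 : t < D.length
  · by_cases h2 : pvGet D t == c
    · simp [h1, h2]; exact extendEq_le D c (t + 1) h1
    · simp [h1, h2]; omega
  · simp [h1]; omega
termination_by D.length - t

theorem extendEq_const (D : List String) (c : String) (t : Nat) :
    ∀ k, t ≤ k → k < extendEq D c t → pvGet D k == c := by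
  intro k hk1 hk2
  by_cases h1 : t < D.length
  · by_cases h2 : pvGet D t == c
    · have e : extendEq D c t = extendEq D c (t + 1) := by rw [extendEq]; simp [h1, h2]
      by_cases hkt : k = t
      · subst hkt; exact h2
      · exact extendEq_const D c (t + 1) k (by omega) (by rw [← e]; exact hk2)
    · have e : extendEq D c t = t := by rw [extendEq]; simp [h1, h2]
      omega
  · have e : extendEq D c t = t := by rw [extendEq]; simp [h1]
    omega
termination_by D.length - t

theorem extendEq_exit (D : List String) (c : String) (t : Nat) (h : extendEq D c t < D.length) :
    ¬(pvGet D (extendEq D c t) == c) := by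
  by_cases h1 : t < D.length
  · by_cases h2 : pvGet D t == c
    · have e : extendEq D c t = extendEq D c (t + 1) := by rw [extendEq]; simp [h1, h2]
      rw [e] at h ⊢; exact extendEq_exit D c (t + 1) h
    · have e : extendEq D c t = t := by rw [extendEq]; simp [h1, h2]
      rw [e]; exact h2
  · exfalso
    have e : extendEq D c t = t := by rw [extendEq]; simp [h1]
    rw [e] at h; exact h1 h
termination_by D.length - t

theorem runEnd_eq_extendEq (blocks : List String) (c : String) (j : Nat) :
    runEnd blocks c j = extendEq blocks c j := by
  rw [runEnd, extendEq]
  by_cases h1 : j < blocks.length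
  · by_cases h2 : pvGet blocks j == c
    · simp [h1, h2, runEnd_eq_extendEq blocks c (j + 1)]
    · simp [h1, h2]
  · simp [h1]
termination_by blocks.length - j

-- ---------- the run-length partition produced by B's tokenizer ----------

def PartRuns (blocks : List String) : Nat → List (Nat × Nat) → Prop
  | i, [] => i = blocks.length
  | i, r :: rs => r.1 = i ∧ i < r.2 ∧ r.2 ≤ blocks.length ∧
      (∀ k, r.1 ≤ k → k < r.2 → pvGet blocks k = pvGet blocks r.1) ∧
      (r.2 < blocks.length → ¬(pvGet blocks r.2 = pvGet blocks r.1)) ∧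
      PartRuns blocks r.2 rs

theorem partRuns_rle (blocks : List String) (i : Nat) (hi : i ≤ blocks.length) :
    PartRuns blocks i (rleAux blocks i) := by
  rw [rleAux]
  by_cases h1 : i < blocks.length
  · simp only [if_pos h1, runEnd_eq_extendEq]
    have hj1 : i + 1 ≤ extendEq blocks (pvGet blocks i) (i + 1) := by
      rw [← runEnd_eq_extendEq]; exact le_runEnd _ _ _
    have hj2 : extendEq blocks (pvGet blocks i) (i + 1) ≤ blocks.length :=
      extendEq_le _ _ _ (by omega)
    refine ⟨rfl, by omega, hj2, ?_, ?_, partRuns_rle blocks _ hj2⟩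
    · intro k hk1 hk2
      by_cases hk : k = i
      · rw [hk]
      · exact eq_of_beq (extendEq_const blocks (pvGet blocks i) (i + 1) k (by omega) hk2)
    · intro hlt heq
      exact extendEq_exit blocks (pvGet blocks i) (i + 1) hlt (beq_iff_eq.mpr heq)
  · simp only [if_neg h1, PartRuns]
    omega
termination_by blocks.length - i
decreasing_by omega

theorem partRuns_bounds (blocks : List String) : ∀ rs i, PartRuns blocks i rs →
    ∀ r ∈ rs, i ≤ r.1 ∧ r.1 < r.2 ∧ r.2 ≤ blocks.length := by
  intro rs
  induction rs with
  | nil => intro i _ r hr; simp at hr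
  | cons r rs ih =>
    intro i hp r' hr'
    obtain ⟨h1, h2, h3, _, _, h6⟩ := hp
    rcases List.mem_cons.mp hr' with he | hm
    · subst he; omega
    · have := ih r.2 h6 r' hm
      omega

theorem partRuns_pairwise (blocks : List String) : ∀ rs i, PartRuns blocks i rs →
    rs.Pairwise (fun x y => x.2 ≤ y.1) := by
  intro rs
  induction rs with
  | nil => intro i _; exact List.Pairwise.nil
  | cons r rs ih =>
    intro i hp
    obtain ⟨h1, h2, h3, _, _, h6⟩ := hp
    refine List.Pairwise.cons ?_ (ih r.2 h6)
    intro y hy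
    exact (partRuns_bounds blocks rs r.2 h6 y hy).1

theorem partRuns_const (blocks : List String) : ∀ rs i, PartRuns blocks i rs →
    ∀ r ∈ rs, ∀ k, r.1 ≤ k → k < r.2 → pvGet blocks k = pvGet blocks r.1 := by
  intro rs
  induction rs with
  | nil => intro i _ r hr; simp at hr
  | cons r rs ih =>
    intro i hp r' hr'
    obtain ⟨h1, h2, h3, h4, _, h6⟩ := hp
    rcases List.mem_cons.mp hr' with he | hm
    · subst he; exact h4
    · exact ih r.2 h6 r' hm

theorem partRuns_cover (blocks : List String) : ∀ rs i, PartRuns blocks i rs →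
    ∀ k, i ≤ k → k < blocks.length → ∃ r ∈ rs, r.1 ≤ k ∧ k < r.2 := by
  intro rs
  induction rs with
  | nil =>
    intro i hp k hk1 hk2
    have hi : i = blocks.length := hp
    omega
  | cons r rs ih =>
    intro i hp k hk1 hk2
    obtain ⟨h1, h2, h3, _, _, h6⟩ := hp
    by_cases hk : k < r.2
    · exact ⟨r, List.mem_cons_self, by omega, hk⟩
    · obtain ⟨r', hm, ha, hb⟩ := ih r.2 h6 k (by omega) hk2
      exact ⟨r', List.mem_cons_of_mem _ hm, ha, hb⟩

-- ---------- A's two tokenizers, expressed through the partition ----------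

theorem fsAux_filter (blocks : List String) : ∀ rs i, PartRuns blocks i rs →
    fsAux blocks i = rs.filter (fun r => pvGet blocks r.1 == ".") := by
  intro rs
  induction rs with
  | nil =>
    intro i hp
    have hi : i = blocks.length := hp
    rw [fsAux]
    simp [hi]
  | cons r rs ih =>
    intro i hp
    obtain ⟨a, b⟩ := r
    obtain ⟨h1, h2, h3, h4, h5, h6⟩ := hp
    simp only at h1 h2 h3 h4 h5 h6
    subst h1
    have hin : a < blocks.length := by omega
    by_cases hd : pvGet blocks a == "."
    · have hs1 : skipNonDot blocks a = a := by rw [skipNonDot]; simp [hin, hd]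
      have hs2 : skipDot blocks a = b := by
        refine skipDot_stops blocks a b (by omega) h3 ?_ ?_
        · intro k hk1 hk2
          rw [beq_iff_eq, h4 k hk1 hk2]
          exact eq_of_beq hd
        · by_cases hbl : b < blocks.length
          · right
            rw [beq_iff_eq]
            intro he
            exact h5 hbl (he.trans (eq_of_beq hd).symm)
          · left; omega
      rw [fsAux]
      simp only [hs1, if_pos hin, hs2]
      rw [List.filter_cons_of_pos (by simpa using hd)]
      rw [ih b h6]
    · have hnd : ∀ k, a ≤ k → k < b → ¬(pvGet blocks k == ".") := by
        intro k hk1 hk2 hbeq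
        rw [beq_iff_eq, h4 k hk1 hk2] at hbeq
        exact hd (beq_iff_eq.mpr hbeq)
      have hcong : skipNonDot blocks a = skipNonDot blocks b :=
        skipNonDot_congr blocks a b (by omega) h3 hnd
      have hstep : fsAux blocks a = fsAux blocks b := by
        rw [fsAux]
        conv_rhs => rw [fsAux]
        by_cases hb : b < blocks.length
        · simp only [if_pos hin, if_pos hb, hcong]
        · have hbl : b = blocks.length := by omega
          have hlen : skipNonDot blocks a = blocks.length := by
            rw [hcong, hbl, skipNonDot]
            simp
          simp [hin, hb, hlen]
      rw [hstep, List.filter_cons_of_neg (by simpa using hd)]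
      exact ih b h6

def endsDot (blocks : List String) : List (Nat × Nat) → Bool
  | [] => false
  | [r] => pvGet blocks r.1 == "."
  | _ :: rs => endsDot blocks rs

theorem ffAux_filter (blocks : List String) : ∀ rs i, PartRuns blocks i rs →
    ffAux blocks i = rs.filter (fun r => !(pvGet blocks r.1 == ".")) ++
      (if endsDot blocks rs then [(blocks.length, blocks.length)] else []) := by
  intro rs
  induction rs with
  | nil =>
    intro i hp
    have hi : i = blocks.length := hp
    rw [ffAux]
    simp [hi, endsDot]
  | cons r rs ih =>
    intro i hp
    obtain ⟨a, b⟩ := r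
    obtain ⟨h1, h2, h3, h4, h5, h6⟩ := hp
    simp only at h1 h2 h3 h4 h5 h6
    subst h1
    have hin : a < blocks.length := by omega
    by_cases hd : pvGet blocks a == "."
    · have hdots : ∀ k, a ≤ k → k < b → pvGet blocks k == "." := by
        intro k hk1 hk2
        rw [beq_iff_eq, h4 k hk1 hk2]
        exact eq_of_beq hd
      have hcong : skipDot blocks a = skipDot blocks b :=
        skipDot_congr blocks a b (by omega) h3 hdots
      cases rs with
      | nil =>
        have hb : b = blocks.length := h6
        have hsd : skipDot blocks a = blocks.length := by
          rw [hcong, hb, skipDot]; simp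
        have hee : extendEq blocks (pvGet blocks blocks.length) blocks.length = blocks.length := by
          rw [extendEq]; simp
        rw [ffAux]
        simp only [if_pos hin, hsd, hee]
        rw [List.filter_cons_of_neg (by simpa using hd)]
        have hff : ffAux blocks blocks.length = [] := by rw [ffAux]; simp
        simp [hff, endsDot, hd]
      | cons r' rs' =>
        have hb : b < blocks.length := by
          have := partRuns_bounds blocks (r' :: rs') b h6 r' List.mem_cons_self
          omega
        have hstep : ffAux blocks a = ffAux blocks b := by
          rw [ffAux]
          conv_rhs => rw [ffAux]
          simp only [if_pos hin, if_pos hb, hcong]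
        rw [hstep, ih b h6]
        simp [List.filter_cons, hd, endsDot]
    · have hsd : skipDot blocks a = a := by rw [skipDot]; simp [hin, hd]
      have htemp : extendEq blocks (pvGet blocks a) a = b := by
        refine extendEq_stops blocks (pvGet blocks a) a b (by omega) h3 ?_ ?_
        · intro k hk1 hk2
          exact beq_iff_eq.mpr (h4 k hk1 hk2)
        · by_cases hbl : b < blocks.length
          · right
            rw [beq_iff_eq]
            exact h5 hbl
          · left; omega
      rw [ffAux]
      simp only [if_pos hin, hsd, htemp]
      rw [ih b h6, List.filter_cons_of_pos (by simpa using hd)]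
      have hends : endsDot blocks ((a, b) :: rs) = endsDot blocks rs := by
        cases rs with
        | nil => simp [endsDot, hd]
        | cons r' rs' => simp [endsDot]
      rw [hends]
      simp

-- ---------- placements, coverage, disjointness ----------

def covOf (pl : String × Nat × Nat) (i : Nat) : Prop := pl.2.1 ≤ i ∧ i < pl.2.1 + pl.2.2

def plDisj (x y : String × Nat × Nat) : Prop := x.2.1 + x.2.2 ≤ y.2.1 ∨ y.2.1 + y.2.2 ≤ x.2.1

def toPl (blocks : List String) (f : Nat × Nat) : String × Nat × Nat :=
  (pvGet blocks f.1, f.1, f.2 - f.1)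

theorem cellB_none (xs : List (String × Nat × Nat)) (i : Nat)
    (h : ∀ x ∈ xs, ¬ covOf x i) : cellB xs i = "." := by
  induction xs with
  | nil => rfl
  | cons x xs ih =>
    obtain ⟨c, p, l⟩ := x
    have hx : ¬ covOf (c, p, l) i := h _ List.mem_cons_self
    rw [cellB, if_neg (by simpa [covOf] using hx)]
    exact ih (fun y hy => h y (List.mem_cons_of_mem _ hy))

theorem cellB_unique (xs : List (String × Nat × Nat)) (i : Nat) (x : String × Nat × Nat)
    (hx : x ∈ xs) (hc : covOf x i) (hp : xs.Pairwise plDisj) : cellB xs i = x.1 := by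
  induction xs with
  | nil => simp at hx
  | cons y ys ih =>
    obtain ⟨c, p, l⟩ := y
    rcases List.mem_cons.mp hx with he | hm
    · subst he
      rw [cellB, if_pos (by simpa [covOf] using hc)]
    · have hdisj : plDisj (c, p, l) x := (List.pairwise_cons.mp hp).1 x hm
      have hc1 : x.2.1 ≤ i := hc.1
      have hc2 : i < x.2.1 + x.2.2 := hc.2
      have hnc : ¬ (p ≤ i ∧ i < p + l) := by
        rcases hdisj with hdj | hdj
        · have hz : p + l ≤ x.2.1 := hdj
          omega
        · have hz : x.2.1 + x.2.2 ≤ p := hdj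
          omega
      rw [cellB, if_neg hnc]
      exact ih hm (List.pairwise_cons.mp hp).2

-- ---------- the swap loop, pointwise ----------

theorem pvGet_set (D : List String) (j : Nat) (v : String) (i : Nat) :
    pvGet (D.set j v) i = if j = i ∧ j < D.length then v else pvGet D i := by
  simp only [pvGet, List.getD, List.getElem?_set]
  by_cases h1 : j = i
  · subst h1
    by_cases h2 : j < D.length <;> simp [h2]
  · simp [h1]

theorem swapLoop_length (D : List String) (l r e : Nat) :
    (swapLoop D l r e).length = D.length := by
  rw [swapLoop]
  by_cases h : r < e
  · rw [if_pos h, swapLoop_length]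
    simp
  · rw [if_neg h]
termination_by e - r

theorem swapLoop_get (k : Nat) : ∀ (D : List String) (gs fs : Nat), fs + k ≤ D.length →
    gs + k ≤ fs → ∀ i, pvGet (swapLoop D gs fs (fs + k)) i =
      if gs ≤ i ∧ i < gs + k then pvGet D (fs + (i - gs))
      else if fs ≤ i ∧ i < fs + k then pvGet D (gs + (i - fs))
      else pvGet D i := by
  induction k with
  | zero =>
    intro D gs fs hlen hdisj i
    rw [swapLoop, if_neg (by omega)]
    have h1 : ¬ (gs ≤ i ∧ i < gs + 0) := by omega
    have h2 : ¬ (fs ≤ i ∧ i < fs + 0) := by omega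
    rw [if_neg h1, if_neg h2]
  | succ k ih =>
    intro D gs fs hlen hdisj i
    have hfs : fs < D.length := by omega
    have hgs : gs < D.length := by omega
    have hstep : swapLoop D gs fs (fs + (k + 1)) =
        swapLoop ((D.set gs (pvGet D fs)).set fs (pvGet D gs)) (gs + 1) (fs + 1) ((fs + 1) + k) := by
      rw [swapLoop, if_pos (by omega)]
      congr 1
      omega
    have hlen1 : (fs + 1) + k ≤ ((D.set gs (pvGet D fs)).set fs (pvGet D gs)).length := by
      simp
      omega
    rw [hstep, ih _ (gs + 1) (fs + 1) hlen1 (by omega) i]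
    simp only [pvGet_set, List.length_set]
    split_ifs <;> first | rfl | (congr 1; omega)

-- ---------- A's gap scan agrees with B's ----------

theorem procA_skip (D : List String) (f : Nat × Nat) : ∀ sp, (∀ g ∈ sp, f.1 ≤ g.1) →
    procA D f sp = (D, sp) := by
  intro sp
  induction sp with
  | nil => intro _; rfl
  | cons g rest ih =>
    intro h
    obtain ⟨gs, ge⟩ := g
    have hg : f.1 ≤ gs := h _ List.mem_cons_self
    rw [procA, if_neg (by omega)]
    rw [ih (fun g hg => h g (List.mem_cons_of_mem _ hg))]

theorem scan_sim (D : List String) (fs fe : Nat) : ∀ sp,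
    sp.Pairwise (fun x y => x.2 ≤ y.1) → (∀ g ∈ sp, g.1 < g.2) →
    procA D (fs, fe) sp =
      ((scanB fs (fe - fs) sp).1.elim D (fun gs => swapLoop D gs fs fe),
        (scanB fs (fe - fs) sp).2) := by
  intro sp
  induction sp with
  | nil =>
    intro _ _
    simp [procA, scanB]
  | cons g rest ih =>
    intro hpw hb
    obtain ⟨gs, ge⟩ := g
    obtain ⟨hhead, htail⟩ := List.pairwise_cons.mp hpw
    by_cases h1 : fs ≤ gs
    · have hskip : procA D (fs, fe) rest = (D, rest) := by
        refine procA_skip D (fs, fe) rest ?_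
        intro g hg
        have h2 : ge ≤ g.1 := hhead g hg
        have h3 : gs < ge := hb _ List.mem_cons_self
        simp only
        omega
      rw [procA, if_neg (by simp only; omega), scanB, if_pos h1]
      simp [hskip]
    · rw [procA, scanB, if_neg h1]
      by_cases h2 : fe - fs ≤ ge - gs
      · rw [if_pos (by simp only; omega), if_pos h2]
        simp only [Option.elim]
        by_cases h3 : fe - fs = ge - gs
        · rw [if_pos h3, if_pos h3.symm]
        · rw [if_neg h3, if_neg (fun h => h3 h.symm)]
      · rw [if_neg (by simp only; omega), if_neg h2]
        rw [ih htail (fun g hg => hb g (List.mem_cons_of_mem _ hg))]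

theorem scanB_none (fs l : Nat) : ∀ sp, (scanB fs l sp).1 = none → (scanB fs l sp).2 = sp := by
  intro sp
  induction sp with
  | nil => intro _; rfl
  | cons g rest ih =>
    obtain ⟨gs, ge⟩ := g
    intro h
    rw [scanB] at h ⊢
    by_cases h1 : fs ≤ gs
    · rw [if_pos h1] at h ⊢
    · rw [if_neg h1] at h ⊢
      by_cases h2 : l ≤ ge - gs
      · rw [if_pos h2] at h
        simp at h
      · rw [if_neg h2] at h ⊢
        simp only at h ⊢
        rw [ih h]

theorem scanB_some (fs l : Nat) : ∀ sp, sp.Pairwise (fun x y => x.2 ≤ y.1) →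
    (∀ g ∈ sp, g.1 < g.2) → ∀ gs, (scanB fs l sp).1 = some gs →
    (∃ ge, (gs, ge) ∈ sp ∧ gs < fs ∧ l ≤ ge - gs) ∧
    ((scanB fs l sp).2.Pairwise (fun x y => x.2 ≤ y.1)) ∧
    (∀ g' ∈ (scanB fs l sp).2, g'.1 < g'.2) ∧
    (∀ g' ∈ (scanB fs l sp).2, ∃ g ∈ sp, g.1 ≤ g'.1 ∧ g'.2 ≤ g.2) ∧
    (∀ g' ∈ (scanB fs l sp).2, g'.2 ≤ gs ∨ gs + l ≤ g'.1) := by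
  intro sp
  induction sp with
  | nil => intro _ _ gs h; simp [scanB] at h
  | cons g rest ih =>
    intro hpw hb gs hsome
    obtain ⟨hgs, hge⟩ := g
    obtain ⟨hhead, htail⟩ := List.pairwise_cons.mp hpw
    have hbh : hgs < hge := hb _ List.mem_cons_self
    rw [scanB] at hsome ⊢
    by_cases h1 : fs ≤ hgs
    · rw [if_pos h1] at hsome
      simp at hsome
    · rw [if_neg h1] at hsome ⊢
      by_cases h2 : l ≤ hge - hgs
      · rw [if_pos h2] at hsome ⊢
        simp only at hsome
        obtain rfl : hgs = gs := by simpa using hsome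
        refine ⟨⟨hge, List.mem_cons_self, by omega, h2⟩, ?_, ?_, ?_, ?_⟩
        · by_cases h3 : hge - hgs = l
          · rw [if_pos h3]
            exact htail
          · rw [if_neg h3]
            refine List.pairwise_cons.mpr ⟨?_, htail⟩
            intro g hg
            have := hhead g hg
            simp only
            omega
        · intro g' hg'
          by_cases h3 : hge - hgs = l
          · rw [if_pos h3] at hg'
            exact hb _ (List.mem_cons_of_mem _ hg')
          · rw [if_neg h3] at hg'
            rcases List.mem_cons.mp hg' with he | hm
            · subst he; simp only; omega
            · exact hb _ (List.mem_cons_of_mem _ hm)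
        · intro g' hg'
          by_cases h3 : hge - hgs = l
          · rw [if_pos h3] at hg'
            exact ⟨g', List.mem_cons_of_mem _ hg', le_refl _, le_refl _⟩
          · rw [if_neg h3] at hg'
            rcases List.mem_cons.mp hg' with he | hm
            · subst he
              exact ⟨(hgs, hge), List.mem_cons_self, by simp only; omega, by simp only; omega⟩
            · exact ⟨g', List.mem_cons_of_mem _ hm, le_refl _, le_refl _⟩
        · intro g' hg'
          by_cases h3 : hge - hgs = l
          · rw [if_pos h3] at hg'
            right
            have := hhead g' hg'
            omega
          · rw [if_neg h3] at hg'
            rcases List.mem_cons.mp hg' with he | hm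
            · subst he; right; simp only; omega
            · right
              have := hhead g' hm
              omega
      · rw [if_neg h2] at hsome ⊢
        simp only at hsome ⊢
        have hbt : ∀ g ∈ rest, g.1 < g.2 := fun g hg => hb _ (List.mem_cons_of_mem _ hg)
        obtain ⟨⟨ge, hmem, hlt, hfit⟩, hp2, hp3, hp4, hp5⟩ := ih htail hbt gs hsome
        refine ⟨⟨ge, List.mem_cons_of_mem _ hmem, hlt, hfit⟩, ?_, ?_, ?_, ?_⟩
        · refine List.pairwise_cons.mpr ⟨?_, hp2⟩
          intro g' hg'
          obtain ⟨g, hgmem, hga, hgb⟩ := hp4 g' hg'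
          have := hhead g hgmem
          simp only
          omega
        · intro g' hg'
          rcases List.mem_cons.mp hg' with he | hm
          · subst he; simp only; omega
          · exact hp3 g' hm
        · intro g' hg'
          rcases List.mem_cons.mp hg' with he | hm
          · subst he
            exact ⟨(hgs, hge), List.mem_cons_self, le_refl _, le_refl _⟩
          · obtain ⟨g, hgmem, hga, hgb⟩ := hp4 g' hm
            exact ⟨g, List.mem_cons_of_mem _ hgmem, hga, hgb⟩
        · intro g' hg'
          rcases List.mem_cons.mp hg' with he | hm
          · subst he
            left
            have := hhead (gs, ge) hmem
            simp only at this ⊢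
            omega
          · exact hp5 g' hm


-- ---------- pointwise helpers ----------

theorem list_eq_of_pvGet (L M : List String) (hL : L.length = M.length)
    (h : ∀ i, i < L.length → pvGet L i = pvGet M i) : L = M := by
  refine List.ext_getElem hL ?_
  intro i h1 h2
  have := h i h1
  rwa [pvGet, pvGet, List.getD_eq_getElem L "" h1, List.getD_eq_getElem M "" h2] at this

theorem pvGet_map_range (f : Nat → String) (n i : Nat) :
    pvGet ((List.range n).map f) i = if i < n then f i else "" := by
  by_cases h : i < n
  · rw [if_pos h, pvGet, List.getD_eq_getElem _ "" (by simpa using h)]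
    simp
  · rw [if_neg h, pvGet, List.getD_eq_default]
    simpa using h

theorem cellB_middle (xs zs : List (String × Nat × Nat)) (y y' : String × Nat × Nat) (i : Nat)
    (hy : ¬ covOf y i) (hy' : ¬ covOf y' i) :
    cellB (xs ++ y :: zs) i = cellB (xs ++ y' :: zs) i := by
  induction xs with
  | nil =>
    obtain ⟨c, p, l⟩ := y
    obtain ⟨c', p', l'⟩ := y'
    simp only [List.nil_append]
    rw [cellB, cellB, if_neg (by simpa [covOf] using hy), if_neg (by simpa [covOf] using hy')]
  | cons x xs ih =>
    obtain ⟨c, p, l⟩ := x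
    simp only [List.cons_append]
    rw [cellB, cellB]
    by_cases hx : p ≤ i ∧ i < p + l
    · rw [if_pos hx, if_pos hx]
    · rw [if_neg hx, if_neg hx]
      exact ih

theorem runs_order (rs : List (Nat × Nat)) (hpw : rs.Pairwise (fun x y => x.2 ≤ y.1)) :
    ∀ r ∈ rs, ∀ f ∈ rs, r = f ∨ r.2 ≤ f.1 ∨ f.2 ≤ r.1 := by
  induction rs with
  | nil => intro r hr; simp at hr
  | cons x xs ih =>
    obtain ⟨hhead, htail⟩ := List.pairwise_cons.mp hpw
    intro r hr f hf
    rcases List.mem_cons.mp hr with he1 | hm1 <;> rcases List.mem_cons.mp hf with he2 | hm2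
    · left; rw [he1, he2]
    · right; left
      rw [he1]
      exact hhead f hm2
    · right; right
      rw [he2]
      exact hhead r hm1
    · exact ih htail r hm1 f hm2

theorem runs_disjoint (rs : List (Nat × Nat)) (hpw : rs.Pairwise (fun x y => x.2 ≤ y.1))
    (r : Nat × Nat) (hr : r ∈ rs) (f : Nat × Nat) (hf : f ∈ rs) (i : Nat)
    (h1 : r.1 ≤ i ∧ i < r.2) (h2 : f.1 ≤ i ∧ i < f.2) : r = f := by
  rcases runs_order rs hpw r hr f hf with h | h | h
  · exact h
  · omega
  · omega

-- ---------- the simulation invariant ----------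

def INV (blocks D : List String) (sp : List (Nat × Nat))
    (placed : List (String × Nat × Nat)) (pend : List (Nat × Nat)) : Prop :=
  D = (List.range blocks.length).map (cellB (placed ++ pend.map (toPl blocks)))
  ∧ sp.Pairwise (fun x y => x.2 ≤ y.1)
  ∧ (∀ g ∈ sp, g.1 < g.2 ∧ g.2 ≤ blocks.length)
  ∧ (∀ g ∈ sp, ∀ pl ∈ placed ++ pend.map (toPl blocks), pl.2.1 + pl.2.2 ≤ g.1 ∨ g.2 ≤ pl.2.1)
  ∧ (placed ++ pend.map (toPl blocks)).Pairwise plDisj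
  ∧ (∀ f ∈ pend, f.1 ≤ f.2 ∧ f.2 ≤ blocks.length)

theorem main_sim (blocks : List String) : ∀ pend D sp placed, INV blocks D sp placed pend →
    mainLoopA D sp pend =
      (List.range blocks.length).map (cellB (placeLoop blocks sp pend placed)) := by
  intro pend
  induction pend with
  | nil =>
    intro D sp placed hinv
    obtain ⟨h1, -, -, -, -, -⟩ := hinv
    simp only [mainLoopA, placeLoop]
    simpa using h1
  | cons f rest ih =>
    intro D sp placed hinv
    obtain ⟨h1, h2, h3, h4, h5, h6⟩ := hinv
    obtain ⟨fs, fe⟩ := f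
    simp only [List.map_cons] at h1 h4 h5
    have hDlen : D.length = blocks.length := by rw [h1]; simp
    have hsim := scan_sim D fs fe sp h2 (fun g hg => (h3 g hg).1)
    simp only [mainLoopA, placeLoop, hsim]
    cases hopt : (scanB fs (fe - fs) sp).1 with
    | none =>
      have hsp : (scanB fs (fe - fs) sp).2 = sp := scanB_none _ _ _ hopt
      simp only [hsp, Option.elim, Option.getD_none]
      apply ih
      have hassoc : (placed ++ [(pvGet blocks fs, fs, fe - fs)]) ++ rest.map (toPl blocks)
          = placed ++ toPl blocks (fs, fe) :: rest.map (toPl blocks) := by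
        rw [List.append_assoc]
        rfl
      refine ⟨?_, h2, h3, ?_, ?_, fun g hg => h6 g (List.mem_cons_of_mem _ hg)⟩
      · rw [hassoc]
        exact h1
      · intro g hg pl hpl
        rw [hassoc] at hpl
        exact h4 g hg pl hpl
      · rw [hassoc]
        exact h5
    | some gs =>
      simp only [Option.elim, Option.getD_some]
      obtain ⟨⟨ge, hmem, hlt, hfit⟩, hp2, hp3, hp4, hp5⟩ :=
        scanB_some fs (fe - fs) sp h2 (fun g hg => (h3 g hg).1) gs hopt
      have hg3 := h3 _ hmem
      have hfb := h6 _ List.mem_cons_self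
      simp only at hfb
      have hmemf : toPl blocks (fs, fe) ∈
          placed ++ toPl blocks (fs, fe) :: rest.map (toPl blocks) :=
        List.mem_append_right _ List.mem_cons_self
      have hdisjf := h4 _ hmem _ hmemf
      have hgefs : ge ≤ fs := by
        rcases hdisjf with h | h
        · exfalso
          have hx : fs + (fe - fs) ≤ gs := h
          omega
        · exact h
      have hglge : gs + (fe - fs) ≤ ge := by omega
      -- pairwise decomposition of the old placement list
      obtain ⟨hplaced, hcr, hcross⟩ := List.pairwise_append.mp h5
      obtain ⟨hor, hrest⟩ := List.pairwise_cons.mp hcr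
      have hpo : ∀ x ∈ placed, plDisj x (toPl blocks (fs, fe)) :=
        fun x hx => hcross x hx _ List.mem_cons_self
      have hpr : ∀ x ∈ placed, ∀ y ∈ rest.map (toPl blocks), plDisj x y :=
        fun x hx y hy => hcross x hx y (List.mem_cons_of_mem _ hy)
      -- the new placement is disjoint from every old one
      have hdnew : ∀ pl ∈ placed ++ toPl blocks (fs, fe) :: rest.map (toPl blocks),
          pl ≠ toPl blocks (fs, fe) → plDisj (pvGet blocks fs, gs, fe - fs) pl := by
        intro pl hpl _
        have := h4 _ hmem _ hpl
        rcases this with h | h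
        · right; exact h
        · left
          simp only
          omega
      have hdnewP : ∀ pl ∈ placed, plDisj (pvGet blocks fs, gs, fe - fs) pl := by
        intro pl hpl
        have := h4 _ hmem _ (List.mem_append_left _ hpl)
        rcases this with h | h
        · right; exact h
        · left; simp only; omega
      have hdnewR : ∀ pl ∈ rest.map (toPl blocks), plDisj (pvGet blocks fs, gs, fe - fs) pl := by
        intro pl hpl
        have := h4 _ hmem _ (List.mem_append_right _ (List.mem_cons_of_mem _ hpl))
        rcases this with h | h
        · right; exact h
        · left; simp only; omega
      have hassoc : (placed ++ [(pvGet blocks fs, gs, fe - fs)]) ++ rest.map (toPl blocks)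
          = placed ++ (pvGet blocks fs, gs, fe - fs) :: rest.map (toPl blocks) := by
        rw [List.append_assoc]
        rfl
      -- the new pairwise-disjointness
      have h5N : ((placed ++ [(pvGet blocks fs, gs, fe - fs)]) ++
          rest.map (toPl blocks)).Pairwise plDisj := by
        rw [hassoc]
        rw [List.pairwise_append]
        refine ⟨hplaced, List.pairwise_cons.mpr ⟨hdnewR, hrest⟩, ?_⟩
        intro x hx y hy
        rcases List.mem_cons.mp hy with he | hm
        · rw [he]
          exact Or.symm (hdnewP x hx)
        · exact hpr x hx y hm
      -- values of the old disk, pointwise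
      have hDi : ∀ j, j < blocks.length → pvGet D j =
          cellB (placed ++ toPl blocks (fs, fe) :: rest.map (toPl blocks)) j := by
        intro j hj
        rw [h1, pvGet_map_range, if_pos hj]
      apply ih
      refine ⟨?_, hp2, ?_, ?_, h5N, fun g hg => h6 g (List.mem_cons_of_mem _ hg)⟩
      · -- the swapped disk is the rendering of the new placements
        have hswlen : (swapLoop D gs fs fe).length = D.length := swapLoop_length D gs fs fe
        refine list_eq_of_pvGet _ _ (by simp [hswlen, hDlen]) ?_
        intro i hi
        rw [hswlen, hDlen] at hi
        have hfeq : swapLoop D gs fs fe = swapLoop D gs fs (fs + (fe - fs)) := by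
          congr 1
          omega
        rw [hfeq, swapLoop_get (fe - fs) D gs fs (by omega) (by omega) i,
          pvGet_map_range, if_pos hi]
        by_cases cA : gs ≤ i ∧ i < gs + (fe - fs)
        · rw [if_pos cA]
          have hj : fs + (i - gs) < blocks.length := by omega
          rw [hDi _ hj]
          have hLv : cellB (placed ++ toPl blocks (fs, fe) :: rest.map (toPl blocks))
              (fs + (i - gs)) = (toPl blocks (fs, fe)).1 := by
            refine cellB_unique _ _ _ hmemf ?_ h5
            constructor
            · simp only [toPl]; omega
            · simp only [toPl]; omega
          rw [hLv, hassoc]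
          have hRv : cellB (placed ++ (pvGet blocks fs, gs, fe - fs) :: rest.map (toPl blocks)) i
              = (pvGet blocks fs, gs, fe - fs).1 := by
            refine cellB_unique _ _ _ (List.mem_append_right _ List.mem_cons_self) ?_ ?_
            · exact ⟨cA.1, cA.2⟩
            · rw [← hassoc]; exact h5N
          rw [hRv]
          rfl
        · rw [if_neg cA]
          by_cases cB : fs ≤ i ∧ i < fs + (fe - fs)
          · rw [if_pos cB]
            have hj2 : gs + (i - fs) < blocks.length := by omega
            rw [hDi _ hj2]
            have hLv : cellB (placed ++ toPl blocks (fs, fe) :: rest.map (toPl blocks))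
                (gs + (i - fs)) = "." := by
              refine cellB_none _ _ ?_
              intro pl hpl hcov
              have := h4 _ hmem _ hpl
              have hc1 : pl.2.1 ≤ gs + (i - fs) := hcov.1
              have hc2 : gs + (i - fs) < pl.2.1 + pl.2.2 := hcov.2
              rcases this with h | h <;> omega
            rw [hLv, hassoc]
            have hRv : cellB (placed ++ (pvGet blocks fs, gs, fe - fs) ::
                rest.map (toPl blocks)) i = "." := by
              refine cellB_none _ _ ?_
              intro pl hpl hcov
              have hc1 : pl.2.1 ≤ i := hcov.1
              have hc2 : i < pl.2.1 + pl.2.2 := hcov.2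
              rcases List.mem_append.mp hpl with hm | hm
              · have hd := hpo pl hm
                rcases hd with h | h
                · have hx : pl.2.1 + pl.2.2 ≤ fs := h
                  omega
                · have hx : fs + (fe - fs) ≤ pl.2.1 := h
                  omega
              · rcases List.mem_cons.mp hm with he | hm2
                · rw [he] at hc1 hc2
                  simp only at hc1 hc2
                  omega
                · have hd := hor pl hm2
                  rcases hd with h | h
                  · have hx : fs + (fe - fs) ≤ pl.2.1 := h
                    omega
                  · have hx : pl.2.1 + pl.2.2 ≤ fs := h
                    omega
            rw [hRv]
          · rw [if_neg cB, hDi _ hi, hassoc]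
            refine cellB_middle _ _ _ _ _ ?_ ?_
            · intro hcov
              have hx1 : fs ≤ i := hcov.1
              have hx2 : i < fs + (fe - fs) := hcov.2
              omega
            · intro hcov
              have hx1 : gs ≤ i := hcov.1
              have hx2 : i < gs + (fe - fs) := hcov.2
              omega
      · -- gap bounds
        intro g' hg'
        obtain ⟨g, hgmem, hga, hgb⟩ := hp4 g' hg'
        have := h3 g hgmem
        exact ⟨hp3 g' hg', by omega⟩
      · -- gaps stay disjoint from all placements
        intro g' hg' pl hpl
        rw [hassoc] at hpl
        rcases List.mem_append.mp hpl with hm | hm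
        · obtain ⟨g, hgmem, hga, hgb⟩ := hp4 g' hg'
          have := h4 g hgmem pl (List.mem_append_left _ hm)
          rcases this with h | h
          · left; omega
          · right; omega
        · rcases List.mem_cons.mp hm with he | hm2
          · rw [he]
            have := hp5 g' hg'
            simp only
            rcases this with h | h
            · right; exact h
            · left; exact h
          · obtain ⟨g, hgmem, hga, hgb⟩ := hp4 g' hg'
            have := h4 g hgmem pl
              (List.mem_append_right _ (List.mem_cons_of_mem _ hm2))
            rcases this with h | h
            · left; omega
            · right; omega

-- ---------- the phantom (n, n) chunk of find_files is a no-op ----------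

theorem procA_phantom (D : List String) (n : Nat) (sp : List (Nat × Nat))
    (h : ∀ g ∈ sp, g.1 < g.2 ∧ g.2 ≤ n) : procA D (n, n) sp = (D, sp) := by
  cases sp with
  | nil => rfl
  | cons g rest =>
    obtain ⟨gs, ge⟩ := g
    have hg := h _ List.mem_cons_self
    simp only at hg
    rw [procA, if_pos (by simp only; omega)]
    have hsw : swapLoop D gs (n, n).1 (n, n).2 = D := by
      rw [swapLoop, if_neg (by simp only; omega)]
    rw [if_neg (by simp only; omega), hsw]
    simp only [Nat.sub_self, Nat.add_zero]

-- ---------- initial invariant ----------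

theorem INV_init (blocks : List String) :
    INV blocks blocks
      ((rleAux blocks 0).filter (fun r => pvGet blocks r.1 == "."))
      []
      (((rleAux blocks 0).filter (fun r => !(pvGet blocks r.1 == "."))).reverse) := by
  have hpart := partRuns_rle blocks 0 (Nat.zero_le _)
  have hpw := partRuns_pairwise blocks (rleAux blocks 0) 0 hpart
  have hbounds := partRuns_bounds blocks (rleAux blocks 0) 0 hpart
  have hconst := partRuns_const blocks (rleAux blocks 0) 0 hpart
  have hcover := partRuns_cover blocks (rleAux blocks 0) 0 hpart
  have hmemFiles : ∀ f, f ∈ ((rleAux blocks 0).filter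
      (fun r => !(pvGet blocks r.1 == "."))).reverse →
      f ∈ rleAux blocks 0 ∧ ¬(pvGet blocks f.1 == ".") := by
    intro f hf
    rw [List.mem_reverse, List.mem_filter] at hf
    exact ⟨hf.1, by simpa using hf.2⟩
  have hmemSp : ∀ g, g ∈ (rleAux blocks 0).filter (fun r => pvGet blocks r.1 == ".") →
      g ∈ rleAux blocks 0 ∧ (pvGet blocks g.1 == ".") := by
    intro g hg
    rw [List.mem_filter] at hg
    exact hg
  refine ⟨?_, ?_, ?_, ?_, ?_, ?_⟩
  · -- blocks is the rendering of its own file runs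
    refine list_eq_of_pvGet _ _ (by simp) ?_
    intro i hi
    rw [pvGet_map_range, if_pos hi]
    obtain ⟨r, hrmem, hri1, hri2⟩ := hcover i (Nat.zero_le _) hi
    have hrb := hbounds r hrmem
    have hval := hconst r hrmem i hri1 hri2
    by_cases hdot : pvGet blocks r.1 == "."
    · rw [hval, eq_of_beq hdot]
      symm
      refine cellB_none _ _ ?_
      intro pl hpl hcov
      simp only [List.nil_append] at hpl
      obtain ⟨f, hf, rfl⟩ := List.mem_map.mp hpl
      obtain ⟨hfmem, hfnd⟩ := hmemFiles f hf
      have hfb := hbounds f hfmem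
      have hcv1 : f.1 ≤ i := hcov.1
      have hcv2 : i < f.1 + (f.2 - f.1) := hcov.2
      have hrf : r = f := runs_disjoint _ hpw r hrmem f hfmem i ⟨hri1, hri2⟩ ⟨hcv1, by omega⟩
      rw [hrf] at hdot
      exact hfnd hdot
    · have hmem : toPl blocks r ∈ [] ++ (((rleAux blocks 0).filter
          (fun r => !(pvGet blocks r.1 == "."))).reverse).map (toPl blocks) := by
        simp only [List.nil_append]
        refine List.mem_map_of_mem ?_
        rw [List.mem_reverse, List.mem_filter]
        exact ⟨hrmem, by simpa using hdot⟩
      rw [hval]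
      symm
      have := cellB_unique _ i (toPl blocks r) hmem ⟨hri1, by simp only [toPl]; omega⟩ ?_
      · exact this
      · -- pairwise disjointness, proved below as well
        simp only [List.nil_append]
        rw [List.pairwise_map, List.pairwise_reverse]
        refine List.Pairwise.imp_of_mem ?_ (List.Pairwise.filter _ hpw)
        intro x y hx hy hxy
        have hxb := hbounds x (List.mem_filter.mp hx).1
        right
        simp only [toPl]
        omega
  · exact List.Pairwise.filter _ hpw
  · intro g hg
    have := hbounds g (hmemSp g hg).1
    omega
  · intro g hg pl hpl
    simp only [List.nil_append] at hpl
    obtain ⟨f, hf, rfl⟩ := List.mem_map.mp hpl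
    obtain ⟨hfmem, hfnd⟩ := hmemFiles f hf
    obtain ⟨hgmem, hgdot⟩ := hmemSp g hg
    have hgf : g ≠ f := by
      intro he
      rw [he] at hgdot
      exact hfnd hgdot
    have hfb := hbounds f hfmem
    rcases runs_order _ hpw g hgmem f hfmem with he | h | h
    · exact absurd he hgf
    · right
      simpa [toPl] using h
    · left
      simp only [toPl]
      omega
  · simp only [List.nil_append]
    rw [List.pairwise_map, List.pairwise_reverse]
    refine List.Pairwise.imp_of_mem ?_ (List.Pairwise.filter _ hpw)
    intro x y hx hy hxy
    have hxb := hbounds x (List.mem_filter.mp hx).1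
    right
    simp only [toPl]
    omega
  · intro f hf
    have := hbounds f (hmemFiles f hf).1
    omega

-- ===== VERDICT (by name: the statement is the Claim_ definition above) =====
theorem compress_full_files_spec : Claim_equal_compress_full_files := by
  intro blocks _
  unfold Spec_compress_full_files
  simp only [compress_full_files, compress_full_files_alt]
  have hpart := partRuns_rle blocks 0 (Nat.zero_le _)
  rw [fsAux_filter blocks _ 0 hpart, ffAux_filter blocks _ 0 hpart]
  have hinit := INV_init blocks
  by_cases hend : endsDot blocks (rleAux blocks 0) = true
  · rw [if_pos hend, List.reverse_append]
    simp only [List.reverse_cons, List.reverse_nil, List.nil_append, List.singleton_append]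
    simp only [mainLoopA]
    rw [procA_phantom blocks blocks.length _ (fun g hg => hinit.2.2.1 g hg)]
    exact main_sim blocks _ blocks _ [] hinit
  · rw [if_neg hend, List.append_nil]
    exact main_sim blocks _ blocks _ [] hinit
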